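-- pv_equiv track=rewrite | github.com/damian-ds7/SPOJ-projekty | SPOJ szachy.py | goniec
-- ===== SOURCE A (Python) =====
-- def goniec(k, g, plansza):
--     ruchy = [(1, -1), (-1, -1), (-1, 1), (1, 1)]
--     y, x = g[0], g[1]
--     for d in ruchy:
--         czy_przeskok = False
--         for j in range(1, 8):
--             kol_kon = x + d[0] * j
--             wier_kon = y + d[1] * j
--             if 0 <= kol_kon < 8 and -1 >= wier_kon > -9:
--                 if plansza[wier_kon][kol_kon] == '.' or plansza[wier_kon][kol_kon] == 'K':
--                     if (wier_kon, kol_kon) == k: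
--                         return True
--                 else:
--                     czy_przeskok = True
--                     break
--             else: break
--         if czy_przeskok: continue
--     return False
-- ===== SOURCE B (Python) =====
-- def goniec(k, g, plansza):
--     y, x = g[0], g[1]
--     dr, dc = k[0] - y, k[1] - x
--     if dr == 0 or abs(dr) != abs(dc) or abs(dr) > 7:
--         return False
--     if not (0 <= k[1] < 8 and -9 < k[0] <= -1):
--         return False
--     sy = 1 if dr > 0 else -1
--     sx = 1 if dc > 0 else -1
--     if not (0 <= x + sx < 8 and -9 < y + sy <= -1):
--         return False
--     return all(plansza[y + sy * i][x + sx * i] in ('.', 'K')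
--                for i in range(1, abs(dr) + 1))
-- ===== Notes on version B (the rewrite author's own statement) =====
-- stated objective: simpler
-- what changed: Replaces A's search over all four diagonal directions with step-by-step scanning by an arithmetic check that the target lies on a bishop diagonal through g (coordinate differences give the direction and distance) followed by a single blocker scan of that one segment.
import Mathlib
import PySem

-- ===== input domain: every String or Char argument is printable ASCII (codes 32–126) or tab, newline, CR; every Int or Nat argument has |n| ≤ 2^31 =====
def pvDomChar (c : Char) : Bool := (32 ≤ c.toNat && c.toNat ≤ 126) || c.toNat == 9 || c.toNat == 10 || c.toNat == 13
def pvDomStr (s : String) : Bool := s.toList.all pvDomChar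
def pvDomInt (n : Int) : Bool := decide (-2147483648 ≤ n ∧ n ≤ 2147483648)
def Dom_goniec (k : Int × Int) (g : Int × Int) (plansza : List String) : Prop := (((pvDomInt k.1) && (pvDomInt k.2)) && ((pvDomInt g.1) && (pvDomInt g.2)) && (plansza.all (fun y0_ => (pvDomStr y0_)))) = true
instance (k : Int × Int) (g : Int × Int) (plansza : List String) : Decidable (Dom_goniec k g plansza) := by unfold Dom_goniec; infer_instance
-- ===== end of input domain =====

-- B replaces A's four-direction step-by-step search by an arithmetic check that the
-- target lies on a bishop diagonal through g plus one blocker scan of that single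
-- segment (objective: simpler). Return value only; neither version mutates its input.

-- ===== PORT A =====
-- plansza[r][c]: Python indexing (negative r indexes from the end); the 'X' default is
-- the IndexError case, which Pre_goniec excludes (exact on every access Pre_ admits).
def pvCell (plansza : List String) (r c : Int) : Char :=
  ((PySem.List.pyGet? plansza r).bind (fun s => PySem.List.pyGet? s.toList c)).getD 'X'

-- the inner 'for j in range(1, 8)' loop of A (kol_kon / wier_kon written inline);
-- some true = 'return True', none = loop broke or was exhausted (outer loop goes on)
def goniecInner (k : Int × Int) (y x : Int) (plansza : List String) (d : Int × Int) :
    Nat → Int → Option Bool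
  | 0, _ => none
  | c + 1, j =>
    if 0 ≤ x + d.1 * j ∧ x + d.1 * j < 8 ∧ -1 ≥ y + d.2 * j ∧ y + d.2 * j > -9 then
      if pvCell plansza (y + d.2 * j) (x + d.1 * j) = '.' ∨
         pvCell plansza (y + d.2 * j) (x + d.1 * j) = 'K' then
        if (y + d.2 * j, x + d.1 * j) = k then some true
        else goniecInner k y x plansza d c (j + 1)
      else none  -- czy_przeskok = True; break ('continue' in the outer loop is a no-op)
    else none  -- break

-- the outer 'for d in ruchy' loop of A
def goniecOuter (k : Int × Int) (y x : Int) (plansza : List String) :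
    List (Int × Int) → Bool
  | [] => false
  | d :: ds =>
    if goniecInner k y x plansza d 7 1 = some true then true
    else goniecOuter k y x plansza ds

def goniec (k : Int × Int) (g : Int × Int) (plansza : List String) : Bool :=
  goniecOuter k g.1 g.2 plansza [(1, -1), (-1, -1), (-1, 1), (1, 1)]

-- ===== PORT B =====
-- all(plansza[y + sy * i][x + sx * i] in ('.', 'K') for i in range(1, abs(dr) + 1))
def pvClear (plansza : List String) (y x sy sx : Int) (n : Nat) : Bool :=
  (List.range n).all (fun i =>
    decide (pvCell plansza (y + sy * (↑i + 1)) (x + sx * (↑i + 1)) = '.' ∨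
            pvCell plansza (y + sy * (↑i + 1)) (x + sx * (↑i + 1)) = 'K'))

def goniec_alt (k : Int × Int) (g : Int × Int) (plansza : List String) : Bool :=
  let y := g.1
  let x := g.2
  let dr := k.1 - y
  let dc := k.2 - x
  if dr = 0 ∨ dr.natAbs ≠ dc.natAbs ∨ 7 < dr.natAbs then false
  else if ¬ (0 ≤ k.2 ∧ k.2 < 8 ∧ -9 < k.1 ∧ k.1 ≤ -1) then false
  else
    let sy : Int := if 0 < dr then 1 else -1
    let sx : Int := if 0 < dc then 1 else -1
    if ¬ (0 ≤ x + sx ∧ x + sx < 8 ∧ -9 < y + sy ∧ y + sy ≤ -1) then false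
    else pvClear plansza y x sy sx dr.natAbs

-- ===== PRECONDITION & SPEC =====
-- does plansza[r][c] succeed in Python? (negative r indexes from the end)
def pvIdxOK (plansza : List String) (r c : Int) : Bool :=
  ((PySem.List.pyGet? plansza r).map (fun s => decide (c < (s.toList.length : Int)))).getD false
-- Pre_ requires every cell A's scan could index to exist: a cell j+1 diagonal steps
-- from g, all of whose run of steps 1..j+1 lies in the board window (col 0..7, row
-- -8..-1).  On boards violating this, Python's plansza[r][c] can raise IndexError; it
-- thereby also excludes boards where a blocking piece happens to stop the scan before
-- the missing cell and A returns False.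
def Pre_goniec (k : Int × Int) (g : Int × Int) (plansza : List String) : Prop :=
  ∀ d ∈ ([(1, -1), (-1, -1), (-1, 1), (1, 1)] : List (Int × Int)), ∀ j : Nat, j < 7 →
    (∀ i : Nat, i ≤ j → 0 ≤ g.2 + d.1 * (1 + ↑i) ∧ g.2 + d.1 * (1 + ↑i) < 8 ∧
        g.1 + d.2 * (1 + ↑i) ≤ -1 ∧ -9 < g.1 + d.2 * (1 + ↑i)) →
    pvIdxOK plansza (g.1 + d.2 * (1 + ↑j)) (g.2 + d.1 * (1 + ↑j)) = true
instance (k : Int × Int) (g : Int × Int) (plansza : List String) : Decidable (Pre_goniec k g plansza) := by unfold Pre_goniec; infer_instance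

def pvWitness_goniec : (Int × Int) × (Int × Int) × List String :=
  ((-1, 0), (-3, 2),
   ["........", "........", "........", "........",
    "........", "........", "........", "........"])

def Spec_goniec (k : Int × Int) (g : Int × Int) (plansza : List String) (out : Bool) : Prop := out = goniec_alt k g plansza
instance (k : Int × Int) (g : Int × Int) (plansza : List String) (out : Bool) : Decidable (Spec_goniec k g plansza out) := by unfold Spec_goniec; infer_instance

-- ===== CLAIM (what is proved, stated in full; the proofs are below) =====
def Claim_equal_goniec : Prop := ∀ (k : Int × Int) (g : Int × Int) (plansza : List String), Dom_goniec k g plansza → Pre_goniec k g plansza → Spec_goniec k g plansza (goniec k g plansza)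

-- ===== LEMMAS AND PROOFS =====

-- proof-only abbreviations: the window / passability condition at diagonal step j
def pvW (y x dx dy j : Int) : Prop :=
  0 ≤ x + dx * j ∧ x + dx * j < 8 ∧ -1 ≥ y + dy * j ∧ y + dy * j > -9
def pvP (plansza : List String) (y x dx dy j : Int) : Prop :=
  pvCell plansza (y + dy * j) (x + dx * j) = '.' ∨
  pvCell plansza (y + dy * j) (x + dx * j) = 'K'

-- what A's inner loop in direction (dx, dy) finds: a hit on k with a clear in-window run
def pvAdir (k : Int × Int) (y x : Int) (plansza : List String) (dx dy : Int) : Prop :=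
  ∃ m : Nat, m < 7 ∧
    (∀ i : Nat, i ≤ m → pvW y x dx dy (1 + ↑i) ∧ pvP plansza y x dx dy (1 + ↑i)) ∧
    (y + dy * (1 + ↑m), x + dx * (1 + ↑m)) = k

-- what B checks, spelled out
def pvB (k : Int × Int) (y x : Int) (plansza : List String) : Prop :=
  (k.1 - y ≠ 0) ∧ (k.1 - y).natAbs = (k.2 - x).natAbs ∧ (k.1 - y).natAbs ≤ 7 ∧
  (0 ≤ k.2 ∧ k.2 < 8 ∧ -9 < k.1 ∧ k.1 ≤ -1) ∧
  (0 ≤ x + (if 0 < k.2 - x then (1 : Int) else -1) ∧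
   x + (if 0 < k.2 - x then (1 : Int) else -1) < 8 ∧
   -9 < y + (if 0 < k.1 - y then (1 : Int) else -1) ∧
   y + (if 0 < k.1 - y then (1 : Int) else -1) ≤ -1) ∧
  ∀ i : Nat, i < (k.1 - y).natAbs →
    pvP plansza y x (if 0 < k.2 - x then (1 : Int) else -1)
      (if 0 < k.1 - y then (1 : Int) else -1) (↑i + 1)

theorem inner_iff (k : Int × Int) (y x : Int) (pl : List String) (d : Int × Int) :
    ∀ (c : Nat) (j : Int), goniecInner k y x pl d c j = some true ↔
      ∃ m : Nat, m < c ∧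
        (∀ i : Nat, i ≤ m → pvW y x d.1 d.2 (j + ↑i) ∧ pvP pl y x d.1 d.2 (j + ↑i)) ∧
        (y + d.2 * (j + ↑m), x + d.1 * (j + ↑m)) = k := by
  intro c
  induction c with
  | zero => intro j; simp [goniecInner]
  | succ c ih =>
    intro j
    simp only [goniecInner]
    split_ifs with hW hP hK
    · constructor
      · intro _
        refine ⟨0, Nat.succ_pos _, ?_, by simpa using hK⟩
        intro i hi
        obtain rfl := Nat.le_zero.mp hi
        exact ⟨by simpa [pvW] using hW, by simpa [pvP] using hP⟩
      · intro _; rfl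
    · rw [ih (j + 1)]
      constructor
      · rintro ⟨m, hm, hall, hpos⟩
        refine ⟨m + 1, by omega, ?_, ?_⟩
        · intro i hi
          cases i with
          | zero => exact ⟨by simpa [pvW] using hW, by simpa [pvP] using hP⟩
          | succ i' =>
            have e : j + ((i' + 1 : Nat) : Int) = (j + 1) + (i' : Int) := by push_cast; ring
            rw [e]; exact hall i' (by omega)
        · have e : j + ((m + 1 : Nat) : Int) = (j + 1) + (m : Int) := by push_cast; ring
          rw [e]; exact hpos
      · rintro ⟨m, hm, hall, hpos⟩
        cases m with
        | zero => exact absurd (by simpa using hpos) hK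
        | succ m' =>
          refine ⟨m', by omega, ?_, ?_⟩
          · intro i hi
            have h := hall (i + 1) (by omega)
            have e : j + ((i + 1 : Nat) : Int) = (j + 1) + (i : Int) := by push_cast; ring
            rw [e] at h; exact h
          · have e : j + ((m' + 1 : Nat) : Int) = (j + 1) + (m' : Int) := by push_cast; ring
            rw [e] at hpos; exact hpos
    · constructor
      · intro h; exact absurd h (by simp)
      · rintro ⟨m, hm, hall, hpos⟩
        exact absurd (by simpa [pvP] using (hall 0 (Nat.zero_le _)).2) hP
    · constructor
      · intro h; exact absurd h (by simp)
      · rintro ⟨m, hm, hall, hpos⟩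
        exact absurd (by simpa [pvW] using (hall 0 (Nat.zero_le _)).1) hW

theorem A_iff (k : Int × Int) (g : Int × Int) (pl : List String) :
    goniec k g pl = true ↔
      (pvAdir k g.1 g.2 pl 1 (-1) ∨ pvAdir k g.1 g.2 pl (-1) (-1) ∨
       pvAdir k g.1 g.2 pl (-1) 1 ∨ pvAdir k g.1 g.2 pl 1 1) := by
  unfold goniec
  simp only [goniecOuter]
  split_ifs with h1 h2 h3 h4
  · exact ⟨fun _ => Or.inl ((inner_iff k g.1 g.2 pl (1, -1) 7 1).mp h1), fun _ => rfl⟩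
  · exact ⟨fun _ => Or.inr (Or.inl ((inner_iff k g.1 g.2 pl (-1, -1) 7 1).mp h2)), fun _ => rfl⟩
  · exact ⟨fun _ => Or.inr (Or.inr (Or.inl ((inner_iff k g.1 g.2 pl (-1, 1) 7 1).mp h3))), fun _ => rfl⟩
  · exact ⟨fun _ => Or.inr (Or.inr (Or.inr ((inner_iff k g.1 g.2 pl (1, 1) 7 1).mp h4))), fun _ => rfl⟩
  · constructor
    · intro h; exact absurd h (by simp)
    · rintro (h | h | h | h)
      exacts [absurd ((inner_iff k g.1 g.2 pl (1, -1) 7 1).mpr h) h1,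
              absurd ((inner_iff k g.1 g.2 pl (-1, -1) 7 1).mpr h) h2,
              absurd ((inner_iff k g.1 g.2 pl (-1, 1) 7 1).mpr h) h3,
              absurd ((inner_iff k g.1 g.2 pl (1, 1) 7 1).mpr h) h4]

theorem B_iff (k : Int × Int) (g : Int × Int) (pl : List String) :
    goniec_alt k g pl = true ↔ pvB k g.1 g.2 pl := by
  simp only [goniec_alt]
  by_cases h1 : (k.1 - g.1 = 0 ∨ (k.1 - g.1).natAbs ≠ (k.2 - g.2).natAbs ∨ 7 < (k.1 - g.1).natAbs)
  · rw [if_pos h1]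
    simp only [Bool.false_eq_true, false_iff]
    rintro ⟨a, b, c, -⟩
    rcases h1 with h | h | h
    exacts [a h, h b, absurd c (by omega)]
  · rw [if_neg h1]
    by_cases h2 : (0 ≤ k.2 ∧ k.2 < 8 ∧ -9 < k.1 ∧ k.1 ≤ -1)
    · rw [if_neg (not_not_intro h2)]
      by_cases h3 : (0 ≤ g.2 + (if 0 < k.2 - g.2 then (1 : Int) else -1) ∧
          g.2 + (if 0 < k.2 - g.2 then (1 : Int) else -1) < 8 ∧
          -9 < g.1 + (if 0 < k.1 - g.1 then (1 : Int) else -1) ∧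
          g.1 + (if 0 < k.1 - g.1 then (1 : Int) else -1) ≤ -1)
      · rw [if_neg (not_not_intro h3)]
        push Not at h1
        unfold pvClear
        rw [List.all_eq_true]
        constructor
        · intro hall
          refine ⟨h1.1, h1.2.1, h1.2.2, h2, h3, ?_⟩
          intro i hi
          have h := hall i (List.mem_range.mpr hi)
          rw [decide_eq_true_eq] at h
          exact h
        · rintro ⟨-, -, -, -, -, hpass⟩
          intro a ha
          rw [decide_eq_true_eq]
          exact hpass a (List.mem_range.mp ha)
      · rw [if_pos h3]
        simp only [Bool.false_eq_true, false_iff]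
        rintro ⟨-, -, -, -, h1w, -⟩; exact h3 h1w
    · rw [if_pos h2]
      simp only [Bool.false_eq_true, false_iff]
      rintro ⟨-, -, -, hk, -, -⟩; exact h2 hk

theorem Adir_to_B (k : Int × Int) (y x : Int) (pl : List String) (dx dy : Int)
    (hdx : dx = 1 ∨ dx = -1) (hdy : dy = 1 ∨ dy = -1)
    (h : pvAdir k y x pl dx dy) : pvB k y x pl := by
  obtain ⟨m, hm, hall, hpos⟩ := h
  have hy1 : y + dy * (1 + ↑m) = k.1 := congrArg Prod.fst hpos
  have hx2 : x + dx * (1 + ↑m) = k.2 := congrArg Prod.snd hpos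
  have hWm := (hall m le_rfl).1
  have hW0 := (hall 0 (Nat.zero_le _)).1
  simp only [pvW, Nat.cast_zero, add_zero, mul_one] at hWm hW0
  have hsy : (if 0 < k.1 - y then (1 : Int) else -1) = dy := by
    rcases hdy with rfl | rfl <;> split_ifs with h <;> omega
  have hsx : (if 0 < k.2 - x then (1 : Int) else -1) = dx := by
    rcases hdx with rfl | rfl <;> split_ifs with h <;> omega
  refine ⟨?_, ?_, ?_, ?_, ?_, ?_⟩
  · rcases hdy with rfl | rfl <;> omega
  · rcases hdy with rfl | rfl <;> rcases hdx with rfl | rfl <;> omega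
  · rcases hdy with rfl | rfl <;> omega
  · rcases hdy with rfl | rfl <;> rcases hdx with rfl | rfl <;> omega
  · simp only [hsx, hsy]; omega
  · intro i hi
    have hp := (hall i (by rcases hdy with rfl | rfl <;> omega)).2
    simp only [hsx, hsy, show ((i : Int) + 1) = 1 + (i : Int) from by ring]
    exact hp

theorem B_to_Adir (k : Int × Int) (y x : Int) (pl : List String) (dx dy : Int)
    (hdx : dx = 1 ∨ dx = -1) (hdy : dy = 1 ∨ dy = -1)
    (hne : k.1 - y ≠ 0) (habs : (k.1 - y).natAbs = (k.2 - x).natAbs)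
    (hle : (k.1 - y).natAbs ≤ 7)
    (hkw : 0 ≤ k.2 ∧ k.2 < 8 ∧ -9 < k.1 ∧ k.1 ≤ -1)
    (hdr : 0 < k.1 - y ↔ dy = 1) (hdc : 0 < k.2 - x ↔ dx = 1)
    (h1w : 0 ≤ x + dx ∧ x + dx < 8 ∧ -9 < y + dy ∧ y + dy ≤ -1)
    (hpass : ∀ i : Nat, i < (k.1 - y).natAbs → pvP pl y x dx dy (↑i + 1)) :
    pvAdir k y x pl dx dy := by
  have hy' : k.1 - y = dy * ((k.1 - y).natAbs : Int) := by
    rcases hdy with rfl | rfl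
    · have := hdr.mpr rfl; omega
    · have : ¬ 0 < k.1 - y := fun hp => by have := hdr.mp hp; omega
      omega
  have hx' : k.2 - x = dx * ((k.2 - x).natAbs : Int) := by
    rcases hdx with rfl | rfl
    · have := hdc.mpr rfl; omega
    · have : ¬ 0 < k.2 - x := fun hp => by have := hdc.mp hp; omega
      omega
  have hn1 : 1 ≤ (k.1 - y).natAbs := by omega
  refine ⟨(k.1 - y).natAbs - 1, by omega, ?_, ?_⟩
  · intro i hi
    refine ⟨?_, ?_⟩
    · simp only [pvW]
      rcases hdx with rfl | rfl <;> rcases hdy with rfl | rfl <;> omega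
    · have hp := hpass i (by omega)
      rw [show (1 + (i : Int)) = (i : Int) + 1 from by ring]
      exact hp
  · refine Prod.ext_iff.mpr ⟨?_, ?_⟩
    · show y + dy * (1 + (((k.1 - y).natAbs - 1 : Nat) : Int)) = k.1
      rcases hdy with rfl | rfl <;> omega
    · show x + dx * (1 + (((k.1 - y).natAbs - 1 : Nat) : Int)) = k.2
      rcases hdx with rfl | rfl <;> omega

theorem B_to_A (k : Int × Int) (y x : Int) (pl : List String) (h : pvB k y x pl) :
    pvAdir k y x pl 1 (-1) ∨ pvAdir k y x pl (-1) (-1) ∨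
    pvAdir k y x pl (-1) 1 ∨ pvAdir k y x pl 1 1 := by
  obtain ⟨hne, habs, hle, hkw, h1w, hpass⟩ := h
  by_cases hy : 0 < k.1 - y <;> by_cases hx : 0 < k.2 - x
  · simp only [if_pos hy, if_pos hx] at h1w hpass
    exact Or.inr (Or.inr (Or.inr (B_to_Adir k y x pl 1 1 (Or.inl rfl) (Or.inl rfl)
      hne habs hle hkw (iff_of_true hy rfl) (iff_of_true hx rfl) h1w hpass)))
  · simp only [if_pos hy, if_neg hx] at h1w hpass
    exact Or.inr (Or.inr (Or.inl (B_to_Adir k y x pl (-1) 1 (Or.inr rfl) (Or.inl rfl)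
      hne habs hle hkw (iff_of_true hy rfl) (iff_of_false hx (by norm_num)) h1w hpass)))
  · simp only [if_neg hy, if_pos hx] at h1w hpass
    exact Or.inl (B_to_Adir k y x pl 1 (-1) (Or.inl rfl) (Or.inr rfl)
      hne habs hle hkw (iff_of_false hy (by norm_num)) (iff_of_true hx rfl) h1w hpass)
  · simp only [if_neg hy, if_neg hx] at h1w hpass
    exact Or.inr (Or.inl (B_to_Adir k y x pl (-1) (-1) (Or.inr rfl) (Or.inr rfl)
      hne habs hle hkw (iff_of_false hy (by norm_num)) (iff_of_false hx (by norm_num)) h1w hpass))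

theorem goniec_eq (k : Int × Int) (g : Int × Int) (pl : List String) :
    goniec k g pl = goniec_alt k g pl := by
  rw [Bool.eq_iff_iff, A_iff, B_iff]
  constructor
  · rintro (h | h | h | h)
    exacts [Adir_to_B k g.1 g.2 pl 1 (-1) (Or.inl rfl) (Or.inr rfl) h,
            Adir_to_B k g.1 g.2 pl (-1) (-1) (Or.inr rfl) (Or.inr rfl) h,
            Adir_to_B k g.1 g.2 pl (-1) 1 (Or.inr rfl) (Or.inl rfl) h,
            Adir_to_B k g.1 g.2 pl 1 1 (Or.inl rfl) (Or.inl rfl) h]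
  · exact B_to_A k g.1 g.2 pl

-- ===== VERDICT (by name: the statement is the Claim_ definition above) =====
theorem goniec_spec : Claim_equal_goniec := by
  intro k g plansza _ _
  unfold Spec_goniec
  exact goniec_eq k g plansza
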